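-- pv_equiv track=rewrite | github.com/TheAlgorithms/Python | backtracking/seating_arrangements.py | generate_seating_arrangement
-- ===== SOURCE A (Python) =====
-- def generate_seating_arrangement(n):
--     """
--     Generates the nth binary sequence where no two '1's are adjacent.
--
--     Args:
--         n (int): The position of the sequence to retrieve.
--
--     Returns:
--         str: The nth valid binary sequence.
--
--     Examples:
--         >>> generate_seating_arrangement(4)
--         '101'
--         >>> generate_seating_arrangement(6)
--         '1001'
--         >>> generate_seating_arrangement(9)
--         '10001'
--     """
--     k2 = 2
--     k1 = ["0"] * (n + 1)
--     k1[1] = "1"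
--     a1 = 1
--
--     while k2 < (n + 1):
--         if k1[a1][-1] == "0":
--             k1[k2] = k1[a1] + "0"
--             k2 += 1
--             if k2 >= (n + 1):
--                 break
--             k1[k2] = k1[a1] + "1"
--             k2 += 1
--             if k2 >= (n + 1):
--                 break
--             a1 += 1
--         elif k1[a1][-1] == "1":
--             k1[k2] = k1[a1] + "0"
--             k2 += 1
--             if k2 >= (n + 1):
--                 break
--             a1 += 1
--     return k1[n]
-- ===== SOURCE B (Python) =====
-- def generate_seating_arrangement(n):
--     # Walk the generations of valid strings level by level (all strings of one
--     # length at a time), keeping only the current level, and index into the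
--     # level that contains the nth string.
--     level = ["1"]
--     i = n - 1
--     while i >= len(level):
--         i -= len(level)
--         level = [c for p in level
--                  for c in ([p + "0", p + "1"] if p[-1] == "0" else [p + "0"])]
--     return level[i]
-- ===== Notes on version B (the rewrite author's own statement) =====
-- stated objective: alternative
-- what changed: Replaces the preallocated n+1 array with two chasing pointers (a1 producer index, k2 write index, mid-iteration breaks) by a generation-by-generation BFS: keep only the current level of strings, expand it with a flatMap, and locate the nth string by subtracting level sizes.
import Mathlib
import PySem

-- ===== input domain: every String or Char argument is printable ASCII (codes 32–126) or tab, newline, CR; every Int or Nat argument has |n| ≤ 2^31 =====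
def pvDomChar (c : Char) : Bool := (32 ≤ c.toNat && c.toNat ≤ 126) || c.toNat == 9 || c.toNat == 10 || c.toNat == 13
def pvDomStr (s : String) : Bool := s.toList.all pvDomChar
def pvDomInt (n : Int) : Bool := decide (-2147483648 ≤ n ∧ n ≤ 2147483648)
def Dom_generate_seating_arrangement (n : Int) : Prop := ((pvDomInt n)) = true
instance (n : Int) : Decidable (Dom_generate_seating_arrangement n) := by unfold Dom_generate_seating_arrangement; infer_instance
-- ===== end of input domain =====

-- B replaces A's array-with-two-pointers generation by a level-by-level BFS that keeps
-- only the current generation of strings (objective: alternative structure, same cost).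

-- ===== PORT A =====
-- the while loop; state (k1, k2, a1); terminates because k2 strictly increases
def pvLoopA (n : Nat) (k1 : List String) (k2 a1 : Nat) : List String :=
  if _h : k2 < n + 1 then
    -- k1[a1] is k1.getD a1 "" (always in range on reachable states); k1[a1][-1] via pyGet?
    if PySem.Str.pyGet? (k1.getD a1 "") (-1) = some '0' then
      -- k1[k2] = k1[a1] + "0"; k2 += 1; break if k2 >= n+1; else k1[k2] = k1[a1] + "1"; …
      if n + 1 ≤ k2 + 1 then k1.set k2 (k1.getD a1 "" ++ "0")
      else if n + 1 ≤ k2 + 2 then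
        (k1.set k2 (k1.getD a1 "" ++ "0")).set (k2 + 1) (k1.getD a1 "" ++ "1")
      else
        pvLoopA n ((k1.set k2 (k1.getD a1 "" ++ "0")).set (k2 + 1) (k1.getD a1 "" ++ "1"))
          (k2 + 2) (a1 + 1)
    else if PySem.Str.pyGet? (k1.getD a1 "") (-1) = some '1' then
      -- k1[k2] = k1[a1] + "0"; k2 += 1; break if k2 >= n+1
      if n + 1 ≤ k2 + 1 then k1.set k2 (k1.getD a1 "" ++ "0")
      else pvLoopA n (k1.set k2 (k1.getD a1 "" ++ "0")) (k2 + 1) (a1 + 1)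
    else k1   -- dead branch: every stored string ends in '0' or '1' (Python would loop forever)
  else k1
termination_by n + 1 - k2
decreasing_by all_goals omega

def generate_seating_arrangement (n : Int) : String :=
  -- k1 = ["0"] * (n + 1); k1[1] = "1"  raises IndexError when n < 1 (excluded by Pre_)
  if n < 1 then "" else
  (pvLoopA n.toNat ((List.replicate (n.toNat + 1) "0").set 1 "1") 2 1).getD n.toNat ""  -- k1[n]

-- ===== PORT B =====
-- the children of one string in the comprehension
def pvChild (p : String) : List String :=
  if PySem.Str.pyGet? p (-1) = some '0' then [p ++ "0", p ++ "1"] else [p ++ "0"]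

-- while i >= len(level): i -= len(level); level = [c for p in level for c in …]
def pvLoopB (level : List String) (i : Nat) : String :=
  if _h : level.length ≤ i then
    if _hl : level.length = 0 then ""     -- dead branch (Python would loop forever)
    else pvLoopB (level.flatMap pvChild) (i - level.length)
  else level.getD i ""                    -- return level[i]
termination_by i
decreasing_by omega

def generate_seating_arrangement_alt (n : Int) : String :=
  if n < 1 then "" else pvLoopB ["1"] (n.toNat - 1)

-- ===== PRECONDITION & SPEC =====
-- Pre_ excludes exactly the inputs below one, on which Python A raises IndexError (the initial
-- store into position one of a too-short list).
def Pre_generate_seating_arrangement (n : Int) : Prop := 1 ≤ n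
instance (n : Int) : Decidable (Pre_generate_seating_arrangement n) := by
  unfold Pre_generate_seating_arrangement; infer_instance

def pvWitness_generate_seating_arrangement : Int := (4)

def Spec_generate_seating_arrangement (n : Int) (out : String) : Prop :=
  out = generate_seating_arrangement_alt n
instance (n : Int) (out : String) : Decidable (Spec_generate_seating_arrangement n out) := by
  unfold Spec_generate_seating_arrangement; infer_instance

-- ===== CLAIM (what is proved, stated in full; the proofs are below) =====
def Claim_equal_generate_seating_arrangement : Prop :=
  ∀ (n : Int), Dom_generate_seating_arrangement n → Pre_generate_seating_arrangement n →
    Spec_generate_seating_arrangement n (generate_seating_arrangement n)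

-- ===== LEMMAS AND PROOFS =====

-- prefixes of the infinite stream of generated strings: "1", then the children of the
-- stream itself, in order
def pvStream : Nat → List String
  | 0 => []
  | k + 1 => "1" :: (pvStream k).flatMap pvChild

-- the i-th (0-based) generated string
def pvT (i : Nat) : String := (pvStream (i + 1)).getD i ""

-- total number of children of the first a stream elements
def pvW (a : Nat) : Nat := ((List.range a).map (fun t => (pvChild (pvT t)).length)).sum

theorem pvChild_len (s : String) : 1 ≤ (pvChild s).length ∧ (pvChild s).length ≤ 2 := by
  unfold pvChild; split <;> simp

theorem pvFlat_len_ge (l : List String) : l.length ≤ (l.flatMap pvChild).length := by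
  induction l with
  | nil => simp
  | cons x xs ih => simp only [List.flatMap_cons, List.length_append, List.length_cons]
                    have := pvChild_len x; omega

theorem pvStream_prefix (k : Nat) : pvStream k <+: pvStream (k + 1) := by
  induction k with
  | zero => exact List.nil_prefix
  | succ k ih =>
    obtain ⟨r, hr⟩ := ih
    refine ⟨r.flatMap pvChild, ?_⟩
    show pvStream (k + 1) ++ List.flatMap pvChild r = pvStream (k + 1 + 1)
    conv_rhs => rw [pvStream, ← hr]
    rw [pvStream, List.flatMap_append, List.cons_append]

theorem pvStream_mono {k k' : Nat} (h : k ≤ k') : pvStream k <+: pvStream k' := by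
  induction k' with
  | zero => simpa [Nat.le_zero.mp h] using List.prefix_refl _
  | succ k' ih =>
    rcases Nat.lt_or_ge k (k' + 1) with h' | h'
    · exact (ih (by omega)).trans (pvStream_prefix k')
    · have : k = k' + 1 := by omega
      subst this; exact List.prefix_refl _

theorem pvStream_len (k : Nat) : k ≤ (pvStream k).length := by
  induction k with
  | zero => simp
  | succ k ih =>
    have := pvFlat_len_ge (pvStream k)
    simp only [pvStream, List.length_cons]; omega

theorem pvGetD_prefix {l l' : List String} (h : l <+: l') {i : Nat} (hi : i < l.length) :
    l.getD i "" = l'.getD i "" := by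
  obtain ⟨r, rfl⟩ := h
  simp [List.getD_eq_getElem?_getD, List.getElem?_append_left hi]

theorem pvT_spec {k i : Nat} (h : i < (pvStream k).length) :
    (pvStream k).getD i "" = pvT i := by
  unfold pvT
  rcases Nat.le_total k (i + 1) with h' | h'
  · exact pvGetD_prefix (pvStream_mono h') h
  · exact (pvGetD_prefix (pvStream_mono h') (by have := pvStream_len (i + 1); omega)).symm

theorem pvT_zero : pvT 0 = "1" := by simp [pvT, pvStream]

theorem pvT_mem (i : Nat) : pvT i ∈ pvStream (i + 1) := by
  have h : i < (pvStream (i + 1)).length := by have := pvStream_len (i + 1); omega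
  rw [pvT, List.getD_eq_getElem _ _ h]
  exact List.getElem_mem h

theorem pvLast_append_zero (p : String) : PySem.List.pyGet? (p ++ "0").toList (-1) = some '0' := by
  have h : (p ++ "0").toList = p.toList ++ ['0'] := by simp
  rw [h, PySem.List.pyGet?_neg_one_append_singleton]

theorem pvLast_append_one (p : String) : PySem.List.pyGet? (p ++ "1").toList (-1) = some '1' := by
  have h : (p ++ "1").toList = p.toList ++ ['1'] := by simp
  rw [h, PySem.List.pyGet?_neg_one_append_singleton]

theorem pvLast_char (i : Nat) :
    PySem.Str.pyGet? (pvT i) (-1) = some '0' ∨ PySem.Str.pyGet? (pvT i) (-1) = some '1' := by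
  have main : ∀ (k : Nat) (s : String), s ∈ pvStream k →
      PySem.List.pyGet? s.toList (-1) = some '0' ∨ PySem.List.pyGet? s.toList (-1) = some '1' := by
    intro k
    induction k with
    | zero => simp [pvStream]
    | succ k ih =>
      intro s hs
      simp only [pvStream, List.mem_cons, List.mem_flatMap] at hs
      rcases hs with rfl | ⟨p, _, hc⟩
      · right; decide
      · unfold pvChild at hc
        split at hc <;> simp at hc <;> rcases hc with rfl | rfl
        · exact Or.inl (pvLast_append_zero p)
        · exact Or.inr (pvLast_append_one p)
        · exact Or.inl (pvLast_append_zero p)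
  exact main (i + 1) (pvT i) (pvT_mem i)

theorem pvW_succ (a : Nat) : pvW (a + 1) = pvW a + (pvChild (pvT a)).length := by
  simp [pvW, List.range_succ]

theorem pvW_ge (a : Nat) : a ≤ pvW a := by
  induction a with
  | zero => simp [pvW]
  | succ a ih => have := pvChild_len (pvT a); rw [pvW_succ]; omega

theorem pvW_add_le (a k : Nat) : pvW a + k ≤ pvW (a + k) := by
  induction k with
  | zero => simp
  | succ k ih =>
    have h1 : a + (k + 1) = (a + k) + 1 := by omega
    rw [h1, pvW_succ]
    have := pvChild_len (pvT (a + k))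
    omega

theorem pvW_take_len {k a : Nat} (h : a ≤ (pvStream k).length) :
    (((pvStream k).take a).flatMap pvChild).length = pvW a := by
  rw [List.length_flatMap, pvW]
  congr 1
  apply List.ext_getElem
  · simp; omega
  · intro t h1 h2
    simp only [List.getElem_map, List.getElem_take, List.getElem_range]
    congr 1
    have ht : t < (pvStream k).length := by simp at h1; omega
    rw [← List.getD_eq_getElem _ "" ht, pvT_spec ht]

-- the children of the a-th stream element occupy stream positions 1 + pvW a, …
theorem pvChild_block (a j : Nat) (hj : j < (pvChild (pvT a)).length) :
    pvT (1 + pvW a + j) = (pvChild (pvT a)).getD j "" := by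
  have ha : a < (pvStream (a + 1)).length := by have := pvStream_len (a + 1); omega
  set l := pvStream (a + 1) with hl
  have hsplit : l = l.take a ++ pvT a :: l.drop (a + 1) := by
    conv_lhs => rw [← List.take_append_drop a l]
    congr 1
    rw [List.drop_eq_getElem_cons ha]
    congr 1
    rw [← List.getD_eq_getElem _ "" ha, hl, pvT_spec ha]
  have hflat : l.flatMap pvChild
      = (l.take a).flatMap pvChild ++ (pvChild (pvT a) ++ (l.drop (a + 1)).flatMap pvChild) := by
    conv_lhs => rw [hsplit]
    simp [List.flatMap_append]
  have hlen : ((l.take a).flatMap pvChild).length = pvW a := pvW_take_len (le_of_lt ha)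
  have hpos : (pvStream (a + 2)).getD (1 + pvW a + j) "" = (pvChild (pvT a)).getD j "" := by
    have : pvStream (a + 2) = "1" :: l.flatMap pvChild := by rw [pvStream]
    rw [this]
    have harith : 1 + pvW a + j = (pvW a + j) + 1 := by omega
    rw [harith, List.getD_cons_succ, hflat,
        List.getD_eq_getElem?_getD, List.getElem?_append_right (by omega),
        List.getElem?_append_left (by omega), hlen]
    simp [List.getD_eq_getElem?_getD]
  have hlt : 1 + pvW a + j < (pvStream (a + 2)).length := by
    have : pvStream (a + 2) = "1" :: l.flatMap pvChild := by rw [pvStream]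
    rw [this, List.length_cons, hflat]
    simp only [List.length_append]
    omega
  rw [← pvT_spec hlt, hpos]

-- ---------- A-side: loop invariant ----------
theorem pvLoopA_inv : ∀ (d n k2 a1 : Nat) (k1 : List String), n + 1 - k2 = d →
    2 ≤ k2 → 1 ≤ a1 → k2 = 2 + pvW (a1 - 1) → k1.length = n + 1 →
    (∀ i, 1 ≤ i → i < k2 → k1.getD i "" = pvT (i - 1)) →
    ∀ j, 1 ≤ j → j ≤ n → (pvLoopA n k1 k2 a1).getD j "" = pvT (j - 1) := by
  intro d
  induction d using Nat.strong_induction_on with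
  | _ d IH =>
    intro n k2 a1 k1 hd hk2 ha1 hW hlen hinv j hj1 hjn
    rw [pvLoopA]
    by_cases hcond : k2 < n + 1
    · simp only [hcond, dif_pos]
      have haW : a1 - 1 ≤ pvW (a1 - 1) := pvW_ge _
      have halt : a1 < k2 := by omega
      have hp : k1.getD a1 "" = pvT (a1 - 1) := hinv a1 ha1 halt
      set a := a1 - 1 with hadef
      rcases pvLast_char a with hlast | hlast
      · -- parent ends in '0': two children
        have hlastL : PySem.List.pyGet? (pvT a).toList (-1) = some '0' := hlast
        rw [hp, if_pos hlast]
        have hchild : pvChild (pvT a) = [pvT a ++ "0", pvT a ++ "1"] := by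
          simp [pvChild, hlastL]
        have hv0 : pvT a ++ "0" = pvT (k2 - 1) := by
          have := pvChild_block a 0 (by rw [hchild]; simp)
          rw [hchild] at this
          simp at this
          rw [← this]; congr 1; omega
        have hv1 : pvT a ++ "1" = pvT k2 := by
          have := pvChild_block a 1 (by rw [hchild]; simp)
          rw [hchild] at this
          simp at this
          rw [← this]; congr 1; omega
        have hset0len : (k1.set k2 (pvT a ++ "0")).length = n + 1 := by simp [hlen]
        have hinv0 : ∀ i, 1 ≤ i → i < k2 + 1 →
            (k1.set k2 (pvT a ++ "0")).getD i "" = pvT (i - 1) := by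
          intro i hi1 hi2
          by_cases hik : i = k2
          · subst hik
            rw [List.getD_eq_getElem?_getD, List.getElem?_set_self (by omega), Option.getD_some, hv0]
          · rw [List.getD_eq_getElem?_getD, List.getElem?_set_ne (by omega),
                ← List.getD_eq_getElem?_getD]
            exact hinv i hi1 (by omega)
        by_cases hbrk1 : n + 1 ≤ k2 + 1
        · rw [if_pos hbrk1]
          exact hinv0 j hj1 (by omega)
        · rw [if_neg hbrk1]
          have hset1len : ((k1.set k2 (pvT a ++ "0")).set (k2 + 1) (pvT a ++ "1")).length = n + 1 := by
            simp [hlen]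
          have hinv1 : ∀ i, 1 ≤ i → i < k2 + 2 →
              ((k1.set k2 (pvT a ++ "0")).set (k2 + 1) (pvT a ++ "1")).getD i "" = pvT (i - 1) := by
            intro i hi1 hi2
            by_cases hik : i = k2 + 1
            · subst hik
              rw [List.getD_eq_getElem?_getD, List.getElem?_set_self (by omega), Option.getD_some, hv1]
              congr 1 <;> omega
            · rw [List.getD_eq_getElem?_getD, List.getElem?_set_ne (by omega),
                  ← List.getD_eq_getElem?_getD]
              exact hinv0 i hi1 (by omega)
          by_cases hbrk2 : n + 1 ≤ k2 + 2
          · rw [if_pos hbrk2]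
            exact hinv1 j hj1 (by omega)
          · rw [if_neg hbrk2]
            have hWnext : k2 + 2 = 2 + pvW (a1 + 1 - 1) := by
              have : a1 + 1 - 1 = a + 1 := by omega
              rw [this, pvW_succ, hchild]
              simp only [List.length_cons, List.length_nil]
              omega
            exact IH (n + 1 - (k2 + 2)) (by omega) n (k2 + 2) (a1 + 1) _ rfl (by omega)
              (by omega) hWnext hset1len hinv1 j hj1 hjn
      · -- parent ends in '1': one child
        have hlastL : PySem.List.pyGet? (pvT a).toList (-1) = some '1' := hlast
        rw [hp, if_neg (by rw [hlast]; decide), if_pos hlast]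
        have hchild : pvChild (pvT a) = [pvT a ++ "0"] := by
          simp [pvChild, hlastL]
        have hv0 : pvT a ++ "0" = pvT (k2 - 1) := by
          have := pvChild_block a 0 (by rw [hchild]; simp)
          rw [hchild] at this
          simp at this
          rw [← this]; congr 1; omega
        have hinv0 : ∀ i, 1 ≤ i → i < k2 + 1 →
            (k1.set k2 (pvT a ++ "0")).getD i "" = pvT (i - 1) := by
          intro i hi1 hi2
          by_cases hik : i = k2
          · subst hik
            rw [List.getD_eq_getElem?_getD, List.getElem?_set_self (by omega), Option.getD_some, hv0]
          · rw [List.getD_eq_getElem?_getD, List.getElem?_set_ne (by omega),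
                ← List.getD_eq_getElem?_getD]
            exact hinv i hi1 (by omega)
        by_cases hbrk1 : n + 1 ≤ k2 + 1
        · rw [if_pos hbrk1]
          exact hinv0 j hj1 (by omega)
        · rw [if_neg hbrk1]
          have hWnext : k2 + 1 = 2 + pvW (a1 + 1 - 1) := by
            have : a1 + 1 - 1 = a + 1 := by omega
            rw [this, pvW_succ, hchild]
            simp only [List.length_cons, List.length_nil]
            omega
          exact IH (n + 1 - (k2 + 1)) (by omega) n (k2 + 1) (a1 + 1) _ rfl (by omega)
            (by omega) hWnext (by simp [hlen]) hinv0 j hj1 hjn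
    · simp only [hcond, dif_neg, not_false_iff]
      exact hinv j hj1 (by omega)

-- ---------- B-side: level invariant ----------
theorem pvFlat_level : ∀ (l : List String) (b : Nat),
    (∀ j, j < l.length → l.getD j "" = pvT (b + j)) →
    (l.flatMap pvChild).length = pvW (b + l.length) - pvW b ∧
    (∀ j, j < (l.flatMap pvChild).length →
      (l.flatMap pvChild).getD j "" = pvT (1 + pvW b + j)) := by
  intro l
  induction l with
  | nil => intro b _; simp
  | cons x xs ih =>
    intro b hel
    have hx : x = pvT b := by
      have := hel 0 (by simp)
      simpa using this
    have hxs : ∀ j, j < xs.length → xs.getD j "" = pvT (b + 1 + j) := by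
      intro j hj
      have := hel (j + 1) (by simp; omega)
      simp only [List.getD_cons_succ] at this
      rw [this]; congr 1; omega
    obtain ⟨ihlen, ihel⟩ := ih (b + 1) hxs
    have hc := pvChild_len (pvT b)
    have hWs := pvW_succ b
    have hmono := pvW_add_le (b + 1) xs.length
    have hmono0 := pvW_add_le b 1
    constructor
    · rw [List.flatMap_cons, List.length_append, ihlen, hx]
      simp only [List.length_cons]
      have : b + (xs.length + 1) = b + 1 + xs.length := by omega
      rw [this]
      omega
    · intro j hj
      rw [List.flatMap_cons] at hj ⊢
      rw [hx] at hj ⊢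
      by_cases hjc : j < (pvChild (pvT b)).length
      · rw [List.getD_eq_getElem?_getD, List.getElem?_append_left hjc,
            ← List.getD_eq_getElem?_getD]
        exact (pvChild_block b j hjc).symm
      · rw [List.getD_eq_getElem?_getD, List.getElem?_append_right (by omega),
            ← List.getD_eq_getElem?_getD]
        have hjlt : j - (pvChild (pvT b)).length < (xs.flatMap pvChild).length := by
          rw [List.length_append] at hj; omega
        rw [ihel _ hjlt]
        congr 1
        omega

theorem pvLoopB_inv : ∀ (i b : Nat) (level : List String), level ≠ [] →
    (∀ j, j < level.length → level.getD j "" = pvT (b + j)) →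
    b + level.length = 1 + pvW b →
    pvLoopB level i = pvT (b + i) := by
  intro i
  induction i using Nat.strong_induction_on with
  | _ i IH =>
    intro b level hne hel hclose
    rw [pvLoopB]
    have hlpos : 1 ≤ level.length := by
      cases level with
      | nil => exact absurd rfl hne
      | cons _ _ => simp
    by_cases hcond : level.length ≤ i
    · simp only [hcond, dif_pos]
      have hlen0 : ¬ level.length = 0 := by omega
      simp only [hlen0, dif_neg, not_false_iff]
      obtain ⟨hflen, hfel⟩ := pvFlat_level level b hel
      have hmono := pvW_add_le b level.length
      have hflen1 : 1 ≤ (level.flatMap pvChild).length := le_trans hlpos (pvFlat_len_ge level)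
      have hne' : level.flatMap pvChild ≠ [] := by
        cases h : level.flatMap pvChild with
        | nil => rw [h] at hflen1; simp at hflen1
        | cons _ _ => simp
      have hel' : ∀ j, j < (level.flatMap pvChild).length →
          (level.flatMap pvChild).getD j "" = pvT (b + level.length + j) := by
        intro j hj
        rw [hfel j hj]
        congr 1
        omega
      have hclose' : (b + level.length) + (level.flatMap pvChild).length
          = 1 + pvW (b + level.length) := by
        rw [hflen]
        omega
      rw [IH (i - level.length) (by omega) (b + level.length) _ hne' hel' hclose']
      congr 1
      omega
    · simp only [hcond, dif_neg, not_false_iff]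
      exact hel i (by omega)

-- ---------- the two ports compute pvT ----------
theorem pvA_eq (n : Int) (hn : 1 ≤ n) :
    generate_seating_arrangement n = pvT (n.toNat - 1) := by
  unfold generate_seating_arrangement
  rw [if_neg (by omega)]
  set m := n.toNat with hm
  have hm1 : 1 ≤ m := by omega
  have hinit : ∀ i, 1 ≤ i → i < 2 →
      ((List.replicate (m + 1) "0").set 1 "1").getD i "" = pvT (i - 1) := by
    intro i hi1 hi2
    have : i = 1 := by omega
    subst this
    rw [List.getD_eq_getElem?_getD, List.getElem?_set_self (by simp; omega), Option.getD_some]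
    simp [pvT_zero]
  have := pvLoopA_inv (m + 1 - 2) m 2 1 _ rfl (by omega) (by omega)
    (by simp [pvW]) (by simp) hinit m hm1 (le_refl m)
  rw [this]

theorem pvB_eq (n : Int) (hn : 1 ≤ n) :
    generate_seating_arrangement_alt n = pvT (n.toNat - 1) := by
  unfold generate_seating_arrangement_alt
  rw [if_neg (by omega)]
  have hel : ∀ j, j < ([("1" : String)]).length → [("1" : String)].getD j "" = pvT (0 + j) := by
    intro j hj
    have : j = 0 := by simpa using hj
    subst this
    simp [pvT_zero]
  have := pvLoopB_inv (n.toNat - 1) 0 ["1"] (by simp) hel (by simp [pvW])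
  simpa using this

-- ===== VERDICT (by name: the statement is the Claim_ definition above) =====
theorem generate_seating_arrangement_spec : Claim_equal_generate_seating_arrangement := by
  intro n _ hpre
  unfold Spec_generate_seating_arrangement
  rw [pvA_eq n hpre, pvB_eq n hpre]
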